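-- pv_equiv track=rewrite | github.com/DanMayhem/project_euler | 061.py | fis
-- ===== SOURCE A (Python) =====
-- def can_chain_from(n, l):
-- 	return str(n)[-2:]==str(l[0])[:2]
--
-- def fis(ss):
-- 	if len(ss)==1:
-- 		for s in ss[0]:
-- 			yield [s]
-- 		return
-- 	for i in range(len(ss)):
-- 		#filter the remaing sets to find cyclical candidates
-- 		for j in range(len(ss[i])):
-- 			#try to find a cyclical set for each number in ss[i], ie ss[i][j]
-- 			ns = []
-- 			for k in range(len(ss)):
-- 				if i!=k:
-- 					ns.append(ss[k])
-- 			#now we have filtered sets for our subsets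
-- 			#recurse
-- 			for l in fis(ns):
-- 				#determin if this sub chain can chain off ss[i][j]
-- 				if can_chain_from(ss[i][j], l):
-- 					yield [ss[i][j]]+l
-- ===== SOURCE B (Python) =====
-- def fis(ss):
--     # Constrained backtracking: instead of generating every chain of the remaining
--     # sets and filtering afterwards (A), recurse with the required two-char prefix
--     # so only matching heads are ever expanded.
--     def rec(sets, prefix):
--         if len(sets) == 1:
--             for x in sets[0]:
--                 if prefix is None or str(x)[:2] == prefix:
--                     yield [x]
--             return
--         for pos in range(len(sets)):
--             rest = sets[:pos] + sets[pos + 1:]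
--             for x in sets[pos]:
--                 if prefix is None or str(x)[:2] == prefix:
--                     for tail in rec(rest, str(x)[-2:]):
--                         yield [x] + tail
--     yield from rec(ss, None)
-- ===== Notes on version B (the rewrite author's own statement) =====
-- stated objective: faster
-- what changed: A enumerates every fully-linked chain of the remaining sets and filters by head afterwards (recomputing the recursion for each candidate element); B does prefix-constrained backtracking: the recursion takes the required two-character prefix and only expands elements whose str()[:2] matches, never generating non-matching sub-chains.
import Mathlib
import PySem

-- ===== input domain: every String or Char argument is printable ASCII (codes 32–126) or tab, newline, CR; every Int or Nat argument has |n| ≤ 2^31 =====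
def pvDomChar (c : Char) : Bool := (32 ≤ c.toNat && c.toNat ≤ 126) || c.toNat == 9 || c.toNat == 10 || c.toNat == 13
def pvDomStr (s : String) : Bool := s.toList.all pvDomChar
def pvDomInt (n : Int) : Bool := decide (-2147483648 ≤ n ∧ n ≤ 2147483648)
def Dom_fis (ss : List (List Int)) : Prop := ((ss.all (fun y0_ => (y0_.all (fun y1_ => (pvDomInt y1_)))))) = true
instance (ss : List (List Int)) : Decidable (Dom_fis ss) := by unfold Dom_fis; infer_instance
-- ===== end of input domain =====

-- B replaces A's generate-then-filter enumeration by prefix-constrained backtracking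
-- (objective: faster — only sub-chains whose head matches the current tail are expanded).

-- ===== PORT A =====
-- str(n)[-2:] and str(n)[:2], ported over List Char (exact: PySem.Int.toChars = str(n))
def suf2 (n : Int) : List Char := PySem.List.slice (PySem.Int.toChars n) (some (-2)) none
def pre2 (n : Int) : List Char := PySem.List.slice (PySem.Int.toChars n) none (some 2)

-- l is nonempty at every call site (fis yields only nonempty chains); Python's l[0]
-- would raise on [], which is unreachable, so headD 0 is exact where called.
def can_chain_from (n : Int) (l : List Int) : Bool := suf2 n == pre2 (l.headD 0)

-- generator loops become flatMap/filter/map over the same ranges; fuel = |ss|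
-- (each recursive call drops exactly one set, so fuel never runs out).
def fisAux : Nat → List (List Int) → List (List Int)
  | 0, _ => []
  | fuel + 1, ss =>
    if ss.length = 1 then
      (ss.headD []).map (fun s => [s])
    else
      (List.range ss.length).flatMap (fun i =>
        (List.range (ss.getD i []).length).flatMap (fun j =>
          let ns := (List.range ss.length).filterMap
            (fun k => if i ≠ k then some (ss.getD k []) else none)
          ((fisAux fuel ns).filter
            (fun l => can_chain_from ((ss.getD i []).getD j 0) l)).map
              (fun l => ((ss.getD i []).getD j 0) :: l)))

def fis (ss : List (List Int)) : List (List Int) := fisAux ss.length ss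

-- ===== PORT B =====
-- prefix is None | str : Option (List Char)
def matchPfx (p? : Option (List Char)) (x : Int) : Bool :=
  match p? with
  | none => true
  | some p => pre2 x == p

def fisAltAux : Nat → List (List Int) → Option (List Char) → List (List Int)
  | 0, _, _ => []
  | fuel + 1, sets, p? =>
    if sets.length = 1 then
      (sets.headD []).flatMap (fun x => if matchPfx p? x then [[x]] else [])
    else
      (List.range sets.length).flatMap (fun (pos : Nat) =>
        let rest := PySem.List.slice sets none (some (pos : Int)) ++
                    PySem.List.slice sets (some ((pos : Int) + 1)) none
        (sets.getD pos []).flatMap (fun x =>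
          if matchPfx p? x then
            (fisAltAux fuel rest (some (suf2 x))).map (fun tail => x :: tail)
          else []))

def fis_alt (ss : List (List Int)) : List (List Int) := fisAltAux ss.length ss none

-- ===== PRECONDITION & SPEC =====
def Spec_fis (ss : List (List Int)) (out : List (List Int)) : Prop := out = fis_alt ss
instance (ss : List (List Int)) (out : List (List Int)) : Decidable (Spec_fis ss out) := by unfold Spec_fis; infer_instance

-- ===== CLAIM (what is proved, stated in full; the proofs are below) =====
def Claim_equal_fis : Prop := ∀ (ss : List (List Int)), Dom_fis ss → Spec_fis ss (fis ss)

-- ===== LEMMAS AND PROOFS =====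

-- a chain's head matches the constraint
def headOk (p? : Option (List Char)) (l : List Int) : Bool := matchPfx p? (l.headD 0)

theorem beq_symm_list {a b : List Char} : (a == b) = (b == a) := by
  by_cases h : a = b
  · simp [h]
  · simp [h, Ne.symm h]

theorem filter_const {α : Type} (c : Bool) (l : List α) :
    l.filter (fun _ => c) = if c then l else [] := by
  cases c <;> simp

theorem filter_flatMap' {α β : Type} (l : List α) (g : α → List β) (p : β → Bool) :
    (l.flatMap g).filter p = l.flatMap (fun x => (g x).filter p) := by
  induction l with
  | nil => simp
  | cons a t ih => simp [List.flatMap_cons, List.filter_append, ih]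

theorem flatMap_if_singleton {α β : Type} (l : List α) (p : α → Bool) (f : α → β) :
    l.flatMap (fun x => if p x then [f x] else []) = (l.filter p).map f := by
  induction l with
  | nil => simp
  | cons a t ih => by_cases h : p a <;> simp [List.flatMap_cons, h, ih]

theorem map_getD_range {α : Type} (xs : List α) (d : α) :
    (List.range xs.length).map (fun j => xs.getD j d) = xs := by
  apply List.ext_getElem
  · simp
  · intro i h1 h2
    simp [List.getD_eq_getElem?_getD, List.getElem_range, List.getElem?_eq_getElem h2]

theorem flatMap_range_getD {α β : Type} (xs : List α) (d : α) (g : α → List β) :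
    (List.range xs.length).flatMap (fun j => g (xs.getD j d)) = xs.flatMap g := by
  have h := congrArg (List.flatMap g) (map_getD_range xs d)
  rwa [List.flatMap_map] at h

theorem ns_eq_erase (sets : List (List Int)) (i : Nat) (h : i < sets.length) :
    (List.range sets.length).filterMap
        (fun k => if i ≠ k then some (sets.getD k []) else none)
      = sets.take i ++ sets.drop (i + 1) := by
  induction sets generalizing i with
  | nil => simp at h
  | cons a t ih =>
    rw [List.length_cons, List.range_succ_eq_map, List.filterMap_cons, List.filterMap_map]
    cases i with
    | zero =>
      simp only [ne_eq, not_true_eq_false, if_false, List.take_zero, List.nil_append,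
        List.drop_succ_cons, List.drop_zero]
      rw [show ((fun k => if (0 : Nat) ≠ k then some ((a :: t).getD k []) else none) ∘
          (· + 1)) = some ∘ (fun k => t.getD k []) by funext k; simp [Function.comp]]
      rw [List.filterMap_eq_map]
      exact map_getD_range t []
    | succ i' =>
      have hi' : i' < t.length := by simpa using h
      simp only [ne_eq, Nat.succ_ne_zero, not_false_eq_true, if_true, List.getD_cons_zero]
      rw [show ((fun k => if (i' + 1 : Nat) ≠ k then some ((a :: t).getD k []) else none) ∘
          (· + 1)) = (fun k => if i' ≠ k then some (t.getD k []) else none) by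
        funext k; simp [Function.comp]]
      rw [ih i' hi']
      simp [List.take_succ_cons, List.drop_succ_cons]

theorem rest_eq_erase (sets : List (List Int)) (pos : Nat) :
    PySem.List.slice sets none (some (pos : Int)) ++
      PySem.List.slice sets (some ((pos : Int) + 1)) none
      = sets.take pos ++ sets.drop (pos + 1) := by
  have h1 : PySem.List.slice sets none (some (pos : Int)) = sets.take pos :=
    PySem.List.slice_to_natCast sets pos
  have h2 : PySem.List.slice sets (some ((pos : Int) + 1)) none = sets.drop (pos + 1) := by
    have : ((pos : Int) + 1) = ((pos + 1 : Nat) : Int) := by push_cast; ring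
    rw [this, PySem.List.slice_from_natCast]
  rw [h1, h2]

theorem headOk_suf2 (x : Int) (l : List Int) :
    headOk (some (suf2 x)) l = can_chain_from x l := by
  simp [headOk, matchPfx, can_chain_from, beq_symm_list]

-- main invariant: the constrained recursion is the filtered unconstrained one
theorem key (fuel : Nat) : ∀ (sets : List (List Int)) (p? : Option (List Char)),
    fisAltAux fuel sets p? = (fisAux fuel sets).filter (headOk p?) := by
  induction fuel with
  | zero => intro sets p?; simp [fisAltAux, fisAux]
  | succ fuel ih =>
    intro sets p?
    rw [fisAltAux, fisAux]
    by_cases hlen : sets.length = 1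
    · simp only [hlen, if_true]
      rw [flatMap_if_singleton, List.filter_map]
      congr 1
    · simp only [hlen, if_false]
      rw [filter_flatMap']
      apply List.flatMap_congr
      intro pos hpos
      have hpos' : pos < sets.length := List.mem_range.mp hpos
      rw [filter_flatMap']
      have hg := flatMap_range_getD (sets.getD pos []) (0 : Int)
        (fun y => List.filter (headOk p?) (List.map (fun l => y :: l)
          (List.filter (fun l => can_chain_from y l)
            (fisAux fuel ((List.range sets.length).filterMap
              (fun k => if pos ≠ k then some (sets.getD k []) else none))))))
      refine Eq.trans ?_ hg.symm
      congr 1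
      funext x
      rw [List.filter_map]
      rw [show (headOk p? ∘ fun l => x :: l) = (fun _ : List Int => matchPfx p? x) by
        funext l; simp [Function.comp, headOk]]
      rw [filter_const]
      by_cases hm : matchPfx p? x
      · simp only [hm, if_true]
        rw [ih, ns_eq_erase sets pos hpos', rest_eq_erase]
        congr 1
        exact List.filter_congr (fun l _ => by rw [headOk_suf2])
      · simp [hm]

theorem fis_eq_alt (ss : List (List Int)) : fis ss = fis_alt ss := by
  rw [fis, fis_alt, key]
  have : ∀ l : List Int, headOk none l = true := by intro l; simp [headOk, matchPfx]
  simp [List.filter_congr (fun l _ => this l)]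

-- ===== VERDICT (by name: the statement is the Claim_ definition above) =====
theorem fis_spec : Claim_equal_fis := by
  intro ss _
  unfold Spec_fis
  exact fis_eq_alt ss
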